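-- pv_equiv track=rewrite | github.com/tomo2515x/python1-2022 | src/algo/z12/sol_A.py | get_min_number_of_operations
-- ===== SOURCE A (Python) =====
-- def remove_items(test_list, item):
--
--     res = [i for i in test_list if i != item]
--
--     return res
--
-- def get_min_number_of_operations(a: list[int]) -> int:
--
--     streak = 0
--     operat = []
--
--     for num_index in range(len(a)):
--
--         if a[num_index] <= 0:
--             streak += 1
--
--         else:
--             operat.append(streak)
--             streak = 0
--
--     operat.append(streak)
--     return len(remove_items(operat, 0))
-- ===== SOURCE B (Python) =====
-- def get_min_number_of_operations(a: list[int]) -> int: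
--     count = 0
--     prev_positive = True
--     for x in a:
--         if x <= 0 and prev_positive:
--             count += 1
--         prev_positive = x > 0
--     return count
-- ===== Notes on version B (the rewrite author's own statement) =====
-- stated objective: simpler
-- what changed: Counts run starts (x <= 0 right after a positive or at the front) with a single integer counter, dropping A's streak-length list and the zero-filtering pass.
import Mathlib
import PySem

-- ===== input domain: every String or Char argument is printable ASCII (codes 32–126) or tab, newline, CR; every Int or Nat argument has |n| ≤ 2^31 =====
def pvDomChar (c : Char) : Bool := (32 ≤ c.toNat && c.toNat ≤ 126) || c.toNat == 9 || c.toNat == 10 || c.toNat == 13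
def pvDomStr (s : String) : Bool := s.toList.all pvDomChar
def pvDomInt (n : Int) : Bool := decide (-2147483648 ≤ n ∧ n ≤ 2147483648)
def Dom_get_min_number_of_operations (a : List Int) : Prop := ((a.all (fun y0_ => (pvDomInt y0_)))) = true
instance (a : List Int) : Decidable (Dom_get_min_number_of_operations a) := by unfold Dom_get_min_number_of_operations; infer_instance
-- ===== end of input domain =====

-- ===== PORT A =====
-- for-loop over range(len(a)) with state (streak, operat); then append final streak and count non-zero entries (remove_items = list-comprehension filter)
def get_min_number_of_operations (a : List Int) : Int :=
  let st := (PySem.List.pyRange 0 (a.length : Int) 1).foldl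
    (fun (st : Int × List Int) i =>
      let x := PySem.List.pyGetD a i 0   -- index from range(len(a)), always in range
      if x ≤ 0 then (st.1 + 1, st.2) else (0, st.2 ++ [st.1]))
    (0, [])
  (((st.2 ++ [st.1]).filter (fun i => i ≠ 0)).length : Int)

-- ===== PORT B =====
-- single integer counter: +1 at each run start (x ≤ 0 while the previous element was positive / at the front)
def get_min_number_of_operations_alt (a : List Int) : Int :=
  (a.foldl (fun (st : Int × Bool) x =>
      (if x ≤ 0 ∧ st.2 then st.1 + 1 else st.1, decide (0 < x))) (0, true)).1

-- ===== PRECONDITION & SPEC =====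
def Spec_get_min_number_of_operations (a : List Int) (out : Int) : Prop := out = get_min_number_of_operations_alt a
instance (a : List Int) (out : Int) : Decidable (Spec_get_min_number_of_operations a out) := by unfold Spec_get_min_number_of_operations; infer_instance

-- ===== CLAIM (what is proved, stated in full; the proofs are below) =====
def Claim_equal_get_min_number_of_operations : Prop := ∀ (a : List Int), Dom_get_min_number_of_operations a → Spec_get_min_number_of_operations a (get_min_number_of_operations a)

-- ===== LEMMAS AND PROOFS =====

-- loop invariant relating A's (streak, operat) state to B's (count, prev_positive) state
theorem pv_inv (l : List Int) (s : Int) (ops : List Int) (c : Int)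
    (hs : 0 ≤ s)
    (hc : c = ((ops.filter (fun i => i ≠ 0)).length : Int) + (if s = 0 then 0 else 1)) :
    (((l.foldl (fun (st : Int × List Int) x =>
        if x ≤ 0 then (st.1 + 1, st.2) else (0, st.2 ++ [st.1])) (s, ops)).2
      ++ [(l.foldl (fun (st : Int × List Int) x =>
        if x ≤ 0 then (st.1 + 1, st.2) else (0, st.2 ++ [st.1])) (s, ops)).1]).filter
        (fun i => i ≠ 0)).length
    = (l.foldl (fun (st : Int × Bool) x =>
        (if x ≤ 0 ∧ st.2 then st.1 + 1 else st.1, decide (0 < x))) (c, decide (s = 0))).1 := by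
  induction l generalizing s ops c with
  | nil =>
      simp only [List.foldl_nil, List.filter_append, List.length_append]
      rcases eq_or_ne s 0 with h | h <;> simp [h] at hc ⊢ <;> omega
  | cons x t ih =>
      simp only [List.foldl_cons]
      by_cases hx : x ≤ 0
      · rw [if_pos hx]
        have h1 : ¬ (0 < x) := by omega
        rcases eq_or_ne s 0 with h | h
        · have := ih (s := s + 1) (ops := ops) (c := c + 1)
            (by omega) (by simp [h] at hc; simp only [ne_eq, decide_not]; omega)
          simpa [hx, h, h1, show s + 1 ≠ 0 by omega] using this
        · have := ih (s := s + 1) (ops := ops) (c := c)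
            (by omega) (by simp [h] at hc; simp only [ne_eq, decide_not]; omega)
          simpa [hx, h, h1, show s + 1 ≠ 0 by omega] using this
      · rw [if_neg hx]
        have h1 : (0 < x) := by omega
        have := ih (s := 0) (ops := ops ++ [s]) (c := c)
          (le_refl 0) (by rcases eq_or_ne s 0 with h | h <;> simp [h, List.filter_append] at hc ⊢ <;> omega)
        simpa [hx, h1] using this

-- ===== VERDICT (by name: the statement is the Claim_ definition above) =====
theorem get_min_number_of_operations_spec : Claim_equal_get_min_number_of_operations := by
  intro a _
  unfold Spec_get_min_number_of_operations get_min_number_of_operations get_min_number_of_operations_alt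
  rw [PySem.List.foldl_pyRange_zero_pyGetD' a 0
    (fun (st : Int × List Int) x => if x ≤ 0 then (st.1 + 1, st.2) else (0, st.2 ++ [st.1])) (0, [])]
  have := pv_inv a 0 [] 0 (le_refl 0) (by simp)
  exact_mod_cast this
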